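-- pv_equiv track=rewrite | github.com/SeHeon-Park/Study_Algorithm | 프로그래머스/숫자 게임.py | solution
-- ===== SOURCE A (Python) =====
-- from bisect import bisect_left, bisect_right
--
-- def solution(A, B):
--     answer = 0
--     A.sort()
--     B.sort(reverse=True)
--     ans = []
--     idx = len(B)
--     for b in B:
--         if idx == 0:
--             break
--         idx_l = bisect_left(A, b)-1
--         if idx_l < 0:
--             break
--         if idx_l >= idx:
--             answer += 1
--             idx -= 1
--         else:
--             answer += 1
--             idx = idx_l
--     return answer
-- ===== SOURCE B (Python) =====
-- def solution(A, B):
--     # Same in-place sorts as the original (observable side effect preserved).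
--     A.sort()
--     B.sort(reverse=True)
--     m = len(B)
--     best = m
--     i = 0  # number of elements of A strictly below the current b
--     for j, b in enumerate(reversed(B)):  # ascending scan over B
--         while i < len(A) and A[i] < b:
--             i += 1
--         best = min(best, i + (m - 1 - j))
--     return best
-- ===== Notes on version B (the rewrite author's own statement) =====
-- stated objective: alternative
-- what changed: The bisect-per-element loop with the breaking idx state machine is replaced by one ascending merge scan that computes each rank with a monotone pointer and takes the minimum of the closed-form terms rank + remaining, capped at len(B); same in-place sorts, identical count.
import Mathlib
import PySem

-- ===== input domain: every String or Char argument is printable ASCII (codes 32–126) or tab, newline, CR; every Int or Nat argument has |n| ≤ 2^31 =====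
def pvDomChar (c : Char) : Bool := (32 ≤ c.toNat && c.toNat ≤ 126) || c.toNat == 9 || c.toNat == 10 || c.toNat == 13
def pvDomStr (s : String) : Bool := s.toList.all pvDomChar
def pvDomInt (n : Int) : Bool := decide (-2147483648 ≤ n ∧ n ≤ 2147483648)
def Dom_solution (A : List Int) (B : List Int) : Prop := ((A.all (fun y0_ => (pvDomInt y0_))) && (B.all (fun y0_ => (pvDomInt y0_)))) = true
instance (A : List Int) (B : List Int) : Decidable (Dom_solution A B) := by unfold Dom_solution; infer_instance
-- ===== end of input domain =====

-- B replaces A's bisect-per-element loop with breaking idx state machine by one ascending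
-- merge scan taking a minimum of closed-form terms (objective: alternative, same cost).
-- Both versions sort A ascending and B descending in place; the equivalence proved here is
-- about the RETURN value, and B performs the same in-place sorts as A.

-- ===== PORT A =====
-- bisect_left(A, b) on the (sorted) list A: number of elements strictly below b
def pvBisectLeft (xs : List Int) (x : Int) : Int := (xs.countP (fun a => a < x) : Int)

def solutionLoop (as : List Int) : List Int → Int → Int → Int
  | [], _, answer => answer
  | b :: rest, idx, answer =>
    if idx = 0 then answer
    else
      let idx_l := pvBisectLeft as b - 1
      if idx_l < 0 then answer
      else if idx_l ≥ idx then solutionLoop as rest (idx - 1) (answer + 1)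
      else solutionLoop as rest idx_l (answer + 1)

def solution (A : List Int) (B : List Int) : Int :=
  let as := PySem.List.sorted A (fun x => x) false
  let bs := PySem.List.sorted B (fun x => x) true
  solutionLoop as bs (bs.length : Int) 0

-- ===== PORT B =====
-- the inner `while i < len(A) and A[i] < b: i += 1`
def altAdvance (as : List Int) (b : Int) (i : Nat) : Nat :=
  if h : i < as.length then
    if as[i] < b then altAdvance as b (i + 1) else i
  else i
termination_by as.length - i

-- `for j, b in enumerate(reversed(B)): …` with state (i, best)
def altLoop (as : List Int) (m : Int) : List Int → Nat → Int → Int → Int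
  | [], _, _, best => best
  | b :: rest, i, j, best =>
    let i' := altAdvance as b i
    altLoop as m rest i' (j + 1) (min best ((i' : Int) + (m - 1 - j)))

def solution_alt (A : List Int) (B : List Int) : Int :=
  let as := PySem.List.sorted A (fun x => x) false
  let bs := PySem.List.sorted B (fun x => x) true
  let m : Int := bs.length
  altLoop as m bs.reverse 0 0 m

-- ===== PRECONDITION & SPEC =====
def Spec_solution (A : List Int) (B : List Int) (out : Int) : Prop := out = solution_alt A B
instance (A : List Int) (B : List Int) (out : Int) : Decidable (Spec_solution A B out) := by unfold Spec_solution; infer_instance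

-- ===== CLAIM (what is proved, stated in full; the proofs are below) =====
def Claim_equal_solution : Prop := ∀ (A : List Int) (B : List Int), Dom_solution A B → Spec_solution A B (solution A B)

-- ===== LEMMAS AND PROOFS =====

-- number of elements of as strictly below b (as an Int)
def cnt (as : List Int) (b : Int) : Int := (as.countP (fun a => a < b) : Int)

-- the values c_t + t for the elements of bs, t starting at the given offset
def valsFrom (as : List Int) (t : Int) : List Int → List Int
  | [] => []
  | b :: rest => (cnt as b + t) :: valsFrom as (t + 1) rest

-- the values c(b) + (m - 1 - j) for the elements of bs', j starting at the given offset
def vals2From (as : List Int) (m : Int) (j : Int) : List Int → List Int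
  | [] => []
  | b :: rest => (cnt as b + (m - 1 - j)) :: vals2From as m (j + 1) rest

theorem cnt_nonneg (as : List Int) (b : Int) : 0 ≤ cnt as b := by
  simp [cnt]

theorem valsFrom_shift (as : List Int) (bs : List Int) : ∀ t : Int,
    valsFrom as (t + 1) bs = (valsFrom as t bs).map (fun x => x + 1) := by
  induction bs with
  | nil => intro t; simp [valsFrom]
  | cons b rest ih =>
    intro t
    simp only [valsFrom, List.map, ih (t + 1)]
    congr 1
    omega

theorem valsFrom_nonneg (as : List Int) (bs : List Int) : ∀ t : Int, 0 ≤ t →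
    ∀ x ∈ valsFrom as t bs, 0 ≤ x := by
  induction bs with
  | nil => intro t _ x hx; simp [valsFrom] at hx
  | cons b rest ih =>
    intro t ht x hx
    simp only [valsFrom, List.mem_cons] at hx
    rcases hx with h | h
    · have := cnt_nonneg as b; omega
    · exact ih (t + 1) (by omega) x h

theorem foldl_min_of_le (l : List Int) : ∀ a : Int, (∀ x ∈ l, a ≤ x) →
    List.foldl min a l = a := by
  induction l with
  | nil => intro a _; rfl
  | cons x l ih =>
    intro a h
    have hx : a ≤ x := h x (by simp)
    have hmin : min a x = a := by omega
    simp only [List.foldl, hmin]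
    exact ih a (fun y hy => h y (by simp [hy]))

theorem foldl_min_map_add_one (l : List Int) : ∀ a : Int,
    List.foldl min a (l.map (fun x => x + 1)) = List.foldl min (a - 1) l + 1 := by
  induction l with
  | nil => intro a; simp
  | cons x l ih =>
    intro a
    simp only [List.map, List.foldl]
    rw [ih (min a (x + 1))]
    have h : min a (x + 1) - 1 = min (a - 1) x := by omega
    rw [h]

theorem foldl_min_min (l : List Int) : ∀ a x : Int,
    List.foldl min (min a x) l = min (List.foldl min a l) x := by
  induction l with
  | nil => intro a x; rfl
  | cons y l ih =>
    intro a x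
    simp only [List.foldl]
    have h : min (min a x) y = min (min a y) x := by omega
    rw [h, ih]

theorem foldl_min_reverse (l : List Int) : ∀ a : Int,
    List.foldl min a l.reverse = List.foldl min a l := by
  induction l with
  | nil => intro a; rfl
  | cons x l ih =>
    intro a
    simp only [List.reverse_cons, List.foldl_append, List.foldl, ih]
    rw [← foldl_min_min]

theorem solutionLoop_cons (as : List Int) (b : Int) (rest : List Int) (idx ans : Int) :
    solutionLoop as (b :: rest) idx ans
      = if idx = 0 then ans
        else if pvBisectLeft as b - 1 < 0 then ans
        else if pvBisectLeft as b - 1 ≥ idx then solutionLoop as rest (idx - 1) (ans + 1)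
        else solutionLoop as rest (pvBisectLeft as b - 1) (ans + 1) := rfl

-- A's loop computes min(idx, |bs|, min_t (c_t + t))
theorem solutionLoop_eq (as : List Int) (bs : List Int) : ∀ idx ans : Int, 0 ≤ idx →
    solutionLoop as bs idx ans
      = ans + List.foldl min (min idx (bs.length : Int)) (valsFrom as 0 bs) := by
  induction bs with
  | nil =>
    intro idx ans h
    simp only [solutionLoop, valsFrom, List.length_nil, Nat.cast_zero, List.foldl]
    omega
  | cons b rest ih =>
    intro idx ans h
    by_cases h0 : idx = 0
    · subst h0
      rw [solutionLoop_cons, if_pos rfl]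
      simp only [valsFrom]
      have hlen : (0 : Int) ≤ ((b :: rest).length : Int) := by positivity
      have hstart : min (0 : Int) ((b :: rest).length : Int) = 0 := by omega
      rw [List.length_cons] at hstart ⊢
      rw [hstart]
      have hall : ∀ x ∈ (cnt as b + 0) :: valsFrom as (0 + 1) rest, (0 : Int) ≤ x := by
        intro x hx
        rcases List.mem_cons.mp hx with h1 | h1
        · have := cnt_nonneg as b; omega
        · exact valsFrom_nonneg as rest (0 + 1) (by omega) x h1
      rw [foldl_min_of_le _ _ hall]
      omega
    · have h1 : (1 : Int) ≤ idx := by omega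
      by_cases hc : cnt as b = 0
      · -- idx_l = -1 < 0: break
        have hcv : pvBisectLeft as b = cnt as b := rfl
        rw [solutionLoop_cons, if_neg h0, hcv, if_pos (by omega)]
        -- RHS is ans: the head value is 0 and everything else is ≥ 0
        simp only [valsFrom, hc, List.foldl]
        have hstart : min (min idx ((b :: rest).length : Int)) (0 + 0) = 0 := by
          have : (0 : Int) ≤ ((b :: rest).length : Int) := by positivity
          omega
        rw [hstart, foldl_min_of_le _ _ (valsFrom_nonneg as rest (0 + 1) (by omega))]
        omega
      · have hcpos : (1 : Int) ≤ cnt as b := by have := cnt_nonneg as b; omega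
        have hstep : solutionLoop as (b :: rest) idx ans
            = solutionLoop as rest (min (idx - 1) (cnt as b - 1)) (ans + 1) := by
          have hcv : pvBisectLeft as b = cnt as b := rfl
          rw [solutionLoop_cons, if_neg h0, hcv, if_neg (by omega)]
          by_cases hge : cnt as b - 1 ≥ idx
          · rw [if_pos hge]
            have : min (idx - 1) (cnt as b - 1) = idx - 1 := by omega
            rw [this]
          · rw [if_neg hge]
            have : min (idx - 1) (cnt as b - 1) = cnt as b - 1 := by omega
            rw [this]
        rw [hstep, ih (min (idx - 1) (cnt as b - 1)) (ans + 1) (by omega)]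
        simp only [valsFrom, List.foldl, List.length_cons]
        rw [valsFrom_shift, foldl_min_map_add_one]
        have harith : min (min idx (((rest.length : Int) + 1))) (cnt as b + 0) - 1
            = min (min (idx - 1) (cnt as b - 1)) ((rest.length : Int)) := by omega
        push_cast
        rw [harith]
        omega

-- on a sorted list, position i holds an element < b iff i < (number of elements < b)
theorem sorted_get_lt_iff (as : List Int) (hs : as.Pairwise (· ≤ ·)) :
    ∀ (i : Nat) (h : i < as.length) (b : Int),
      (as[i] < b ↔ i < as.countP (fun a => a < b)) := by
  induction as with
  | nil => intro i h b; exact absurd h (by simp)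
  | cons a tl ih =>
    intro i h b
    have hhead : ∀ x ∈ tl, a ≤ x := fun x hx => List.rel_of_pairwise_cons hs hx
    have htl : tl.Pairwise (· ≤ ·) := hs.of_cons
    by_cases hab : a < b
    · cases i with
      | zero =>
        simp only [List.getElem_cons_zero, List.countP_cons, hab]
        simp
      | succ i =>
        simp only [List.getElem_cons_succ, List.countP_cons]
        rw [ih htl i (by simpa using h) b]
        simp [hab]
    · have hzero : tl.countP (fun a => a < b) = 0 := by
        rw [List.countP_eq_zero]
        intro x hx
        have := hhead x hx
        simp only [decide_eq_true_eq]
        omega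
      cases i with
      | zero =>
        simp only [List.getElem_cons_zero, List.countP_cons, hzero]
        simp [hab]
      | succ i =>
        simp only [List.getElem_cons_succ, List.countP_cons, hzero]
        have hi : i < tl.length := by simpa using h
        have hx := hhead tl[i] (List.getElem_mem hi)
        constructor
        · intro hlt; omega
        · intro hlt; simp [hab] at hlt
    
theorem altAdvance_eq (as : List Int) (b : Int) (hs : as.Pairwise (· ≤ ·)) :
    ∀ i : Nat, i ≤ as.countP (fun a => a < b) →
      altAdvance as b i = as.countP (fun a => a < b) := by
  intro i
  induction i using altAdvance.induct as b with
  | case1 i hlen hlt ih =>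
    intro hle
    rw [altAdvance, dif_pos hlen, if_pos hlt]
    have : i < as.countP (fun a => a < b) := (sorted_get_lt_iff as hs i hlen b).mp hlt
    exact ih (by omega)
  | case2 i hlen hlt =>
    intro hle
    rw [altAdvance, dif_pos hlen, if_neg hlt]
    have : ¬ i < as.countP (fun a => a < b) := by
      intro hc
      exact hlt ((sorted_get_lt_iff as hs i hlen b).mpr hc)
    omega
  | case3 i hlen =>
    intro hle
    rw [altAdvance, dif_neg hlen]
    have := List.countP_le_length (l := as) (p := fun a => a < b)
    omega

-- B's loop folds min over the values c(b) + (m - 1 - j)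
theorem altLoop_eq (as : List Int) (m : Int) (hs : as.Pairwise (· ≤ ·)) :
    ∀ (bs' : List Int) (i : Nat) (j best : Int),
      bs'.Pairwise (· ≤ ·) →
      (∀ b ∈ bs', i ≤ as.countP (fun a => a < b)) →
      altLoop as m bs' i j best = List.foldl min best (vals2From as m j bs') := by
  intro bs'
  induction bs' with
  | nil => intro i j best _ _; rfl
  | cons b rest ih =>
    intro i j best hp hle
    have hadQ : altAdvance as b i = as.countP (fun a => a < b) :=
      altAdvance_eq as b hs i (hle b (by simp))
    simp only [altLoop, vals2From, List.foldl, hadQ]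
    have hcast : ((as.countP (fun a => a < b) : Nat) : Int) = cnt as b := rfl
    rw [hcast]
    refine ih (as.countP (fun a => a < b)) (j + 1) _ hp.of_cons ?_
    intro b' hb'
    have hbb' : b ≤ b' := List.rel_of_pairwise_cons hp hb'
    exact List.countP_mono_left (fun x _ hx => by
      simp only [decide_eq_true_eq] at hx ⊢; omega)

theorem vals2From_append (as : List Int) (m : Int) (l l' : List Int) : ∀ j : Int,
    vals2From as m j (l ++ l') = vals2From as m j l ++ vals2From as m (j + l.length) l' := by
  induction l with
  | nil => intro j; simp [vals2From]
  | cons x l ihl =>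
    intro j
    simp only [List.cons_append, vals2From, ihl (j + 1), List.length_cons]
    congr 2
    push_cast
    ring_nf

theorem vals2From_reverse (as : List Int) (m : Int) (bs : List Int) : ∀ j : Int,
    vals2From as m j bs.reverse = (valsFrom as (m - j - bs.length) bs).reverse := by
  induction bs with
  | nil => intro j; simp [vals2From, valsFrom]
  | cons b rest ih =>
    intro j
    rw [List.reverse_cons, vals2From_append, ih j]
    simp only [valsFrom, List.reverse_cons, List.length_cons, List.length_reverse]
    congr 2
    · congr 1
      push_cast
      omega
    · simp only [vals2From]
      congr 2
      push_cast
      omega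

-- ===== VERDICT (by name: the statement is the Claim_ definition above) =====
theorem solution_spec : Claim_equal_solution := by
  intro A B _
  unfold Spec_solution solution solution_alt
  set as := PySem.List.sorted A (fun x => x) false with has
  set bs := PySem.List.sorted B (fun x => x) true with hbs
  have hsorted : as.Pairwise (· ≤ ·) := PySem.List.sorted_pairwise A (fun x => x)
  have hdesc : bs.Pairwise (fun a b => b ≤ a) := PySem.List.sorted_pairwise_rev B (fun x => x)
  have hasc : bs.reverse.Pairwise (· ≤ ·) := List.pairwise_reverse.mpr hdesc
  rw [solutionLoop_eq as bs (bs.length : Int) 0 (by positivity)]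
  rw [altLoop_eq as (bs.length : Int) hsorted bs.reverse 0 0 (bs.length : Int) hasc
    (fun b _ => Nat.zero_le _)]
  rw [vals2From_reverse, foldl_min_reverse]
  have h0 : ((bs.length : Int) - 0 - (bs.length : Int)) = 0 := by ring
  rw [h0]
  have hmm : min ((bs.length : Int)) ((bs.length : Int)) = (bs.length : Int) := by omega
  rw [hmm]
  omega
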